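-- pv_equiv track=rewrite | github.com/pokerdio/generic | e/e-694.py | signatures
-- ===== SOURCE A (Python) =====
-- def signatures(vp, start, m, n):
--     for i in range(start, len(vp)):
--         p = vp[i]
--         p3 = p ** 3
--         if p3 * m > n:
--             return
--         yield (p,)
--         for combo in signatures(vp, i + 1, m * p3, n):
--             yield (p, *combo)
-- ===== SOURCE B (Python) =====
-- def signatures(vp, start, m, n):
--     # Iterative pre-order DFS over an explicit stack of (index, multiplier, prefix) states.
--     stack = [(start, m, ())]
--     while stack:
--         i, mm, prefix = stack.pop()
--         if i < len(vp):
--             p = vp[i]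
--             p3 = p ** 3
--             if p3 * mm <= n:
--                 yield prefix + (p,)
--                 # sibling continuation first, then child, so the child's whole subtree is popped first
--                 stack.append((i + 1, mm, prefix))
--                 stack.append((i + 1, mm * p3, prefix + (p,)))
-- ===== Notes on version B (the rewrite author's own statement) =====
-- stated objective: alternative
-- what changed: The recursive generator is replaced by an iterative pre-order DFS over an explicit stack of (index, multiplier, prefix) states, pushing the sibling continuation below the child state so the emission order is preserved.
import Mathlib
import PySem

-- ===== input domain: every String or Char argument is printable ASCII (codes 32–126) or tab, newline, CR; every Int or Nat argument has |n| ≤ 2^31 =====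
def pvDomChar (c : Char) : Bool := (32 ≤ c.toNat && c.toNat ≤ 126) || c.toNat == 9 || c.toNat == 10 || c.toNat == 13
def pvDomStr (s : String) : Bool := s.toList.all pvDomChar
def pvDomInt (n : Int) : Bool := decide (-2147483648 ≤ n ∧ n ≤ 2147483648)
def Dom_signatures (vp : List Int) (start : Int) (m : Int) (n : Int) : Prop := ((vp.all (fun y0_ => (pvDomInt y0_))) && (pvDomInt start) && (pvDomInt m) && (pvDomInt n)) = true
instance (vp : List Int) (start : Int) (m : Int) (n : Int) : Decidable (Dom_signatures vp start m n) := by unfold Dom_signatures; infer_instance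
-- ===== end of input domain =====

-- B replaces A's recursive generator by an iterative pre-order DFS over an explicit stack
-- of (index, multiplier, prefix) states (objective: alternative, same cost).

-- ===== PORT A =====
-- A's for-loop over range(start, len(vp)) runs (len(vp) - start) iterations; that count is the
-- structural recursion argument k.  One call of sigGoA is the iteration at index i; the
-- remaining iterations (same m, n) are A's loop continued at i+1, and A's early `return` is the
-- []-branch.  A's inner recursive call signatures(vp, i+1, m*p3, n) has the same count k.
def sigGoA (vp : List Int) (n : Int) : Nat → Int → Int → List (List Int)
  | 0, _, _ => []
  | k + 1, i, m =>
    match PySem.List.pyGet? vp i with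
    | none => []   -- IndexError in Python (i < -len); excluded by Pre_signatures
    | some p =>
      let p3 := p ^ 3
      if p3 * m > n then []
      else [p] :: ((sigGoA vp n k (i + 1) (m * p3)).map (fun c => p :: c)
                    ++ sigGoA vp n k (i + 1) m)

def signatures (vp : List Int) (start : Int) (m : Int) (n : Int) : List (List Int) :=
  sigGoA vp n ((vp.length : Int) - start).toNat start m

-- ===== PORT B =====
-- the while-loop of Source B: pop a (index, multiplier, prefix) state, possibly emit one tuple and
-- push two successor states.  fuel is a totality guard only: it strictly exceeds the number of
-- pops the loop can perform (3^(len-start) bounds the pop count, proved in the lemmas below),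
-- so the 0-fuel branch is never taken from signatures_alt.
def sigAltLoop (vp : List Int) (n : Int) :
    Nat → List (Int × Int × List Int) → List (List Int) → List (List Int)
  | _, [], acc => acc
  | 0, _ :: _, acc => acc
  | f + 1, (i, mm, pref) :: rest, acc =>
    if i < (vp.length : Int) then
      match PySem.List.pyGet? vp i with
      | none => sigAltLoop vp n f rest acc   -- IndexError in Python; excluded by Pre_signatures
      | some p =>
        let p3 := p ^ 3
        if p3 * mm ≤ n then
          sigAltLoop vp n f ((i + 1, mm * p3, pref ++ [p]) :: (i + 1, mm, pref) :: rest)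
            (acc ++ [pref ++ [p]])
        else sigAltLoop vp n f rest acc
    else sigAltLoop vp n f rest acc

def signatures_alt (vp : List Int) (start : Int) (m : Int) (n : Int) : List (List Int) :=
  sigAltLoop vp n (3 ^ ((vp.length : Int) - start).toNat) [(start, m, [])] []

-- ===== PRECONDITION & SPEC =====
-- Pre_ excludes exactly the inputs where Python A raises IndexError: start < -len(vp) makes
-- the first loop iteration access vp[start] out of range (Python B raises there as well).
def Pre_signatures (vp : List Int) (start : Int) (m : Int) (n : Int) : Prop :=
  -(vp.length : Int) ≤ start
instance (vp : List Int) (start : Int) (m : Int) (n : Int) : Decidable (Pre_signatures vp start m n) := by unfold Pre_signatures; infer_instance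
def pvWitness_signatures : List Int × Int × Int × Int := ([2, 3], 0, 1, 100)

def Spec_signatures (vp : List Int) (start : Int) (m : Int) (n : Int) (out : List (List Int)) : Prop := out = signatures_alt vp start m n
instance (vp : List Int) (start : Int) (m : Int) (n : Int) (out : List (List Int)) : Decidable (Spec_signatures vp start m n out) := by unfold Spec_signatures; infer_instance

-- ===== CLAIM (what is proved, stated in full; the proofs are below) =====
def Claim_equal_signatures : Prop := ∀ (vp : List Int) (start : Int) (m : Int) (n : Int), Dom_signatures vp start m n → Pre_signatures vp start m n → Spec_signatures vp start m n (signatures vp start m n)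

-- ===== LEMMAS AND PROOFS =====

-- what one stack frame (i, mm, pref) still has to emit: A's output from that state, each tuple
-- prefixed with pref
def frameOut (vp : List Int) (n : Int) (f : Int × Int × List Int) : List (List Int) :=
  (signatures vp f.1 f.2.1 n).map (fun c => f.2.2 ++ c)

def frameWeight (vp : List Int) (f : Int × Int × List Int) : Nat :=
  3 ^ ((vp.length : Int) - f.1).toNat

theorem one_le_frameWeight (vp : List Int) (f : Int × Int × List Int) :
    1 ≤ frameWeight vp f := Nat.one_le_pow _ _ (by norm_num)

theorem signatures_unfold_lt (vp : List Int) (i mm n : Int) (hi : i < (vp.length : Int)) :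
    signatures vp i mm n
      = match PySem.List.pyGet? vp i with
        | none => []
        | some p =>
          if p ^ 3 * mm > n then []
          else [p] :: ((signatures vp (i + 1) (mm * p ^ 3) n).map (fun c => p :: c)
                        ++ signatures vp (i + 1) mm n) := by
  have hk : ((vp.length : Int) - i).toNat = ((vp.length : Int) - (i + 1)).toNat + 1 := by omega
  unfold signatures
  rw [hk]
  rfl

theorem signatures_unfold_ge (vp : List Int) (i mm n : Int) (hi : ¬ i < (vp.length : Int)) :
    signatures vp i mm n = [] := by
  have hk : ((vp.length : Int) - i).toNat = 0 := by omega
  unfold signatures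
  rw [hk]
  rfl

-- the loop invariant: with enough fuel, processing the stack appends, to acc, each frame's
-- pending output in stack order
theorem sigAltLoop_invariant (vp : List Int) (n : Int) :
    ∀ (fuel : Nat) (stack : List (Int × Int × List Int)) (acc : List (List Int)),
      (stack.map (frameWeight vp)).sum ≤ fuel →
      sigAltLoop vp n fuel stack acc = acc ++ stack.flatMap (frameOut vp n) := by
  intro fuel
  induction fuel with
  | zero =>
    intro stack acc hw
    cases stack with
    | nil => simp [sigAltLoop]
    | cons f rest =>
      exfalso
      have := one_le_frameWeight vp f
      simp [List.map_cons, List.sum_cons] at hw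
      omega
  | succ f ih =>
    intro stack acc hw
    cases stack with
    | nil => simp [sigAltLoop]
    | cons fr rest =>
      obtain ⟨i, mm, pref⟩ := fr
      simp only [List.map_cons, List.sum_cons] at hw
      by_cases hi : i < (vp.length : Int)
      · have hk : ((vp.length : Int) - i).toNat = ((vp.length : Int) - (i + 1)).toNat + 1 := by
          omega
        have hwf : frameWeight vp (i, mm, pref)
            = 3 ^ ((vp.length : Int) - (i + 1)).toNat * 3 := by
          simp only [frameWeight]
          rw [hk, pow_succ]
        have h1 : (1 : Nat) ≤ 3 ^ ((vp.length : Int) - (i + 1)).toNat :=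
          Nat.one_le_pow _ _ (by norm_num)
        rw [sigAltLoop]
        simp only [hi, if_true]
        cases hg : PySem.List.pyGet? vp i with
        | none =>
          rw [ih rest acc (by have := one_le_frameWeight vp (i, mm, pref); omega)]
          have : frameOut vp n (i, mm, pref) = [] := by
            simp [frameOut, signatures_unfold_lt vp i mm n hi, hg]
          simp [this]
        | some p =>
          simp only
          by_cases hc : p ^ 3 * mm ≤ n
          · simp only [hc, if_true]
            have hb : (List.map (frameWeight vp)
                ((i + 1, mm * p ^ 3, pref ++ [p]) :: (i + 1, mm, pref) :: rest)).sum ≤ f := by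
              rw [hwf] at hw
              simp only [List.map_cons, List.sum_cons, frameWeight]
              omega
            rw [ih ((i + 1, mm * p ^ 3, pref ++ [p]) :: (i + 1, mm, pref) :: rest)
                  (acc ++ [pref ++ [p]]) hb]
            have hc' : ¬ p ^ 3 * mm > n := by omega
            simp only [List.flatMap_cons, frameOut, signatures_unfold_lt vp i mm n hi, hg,
              hc', if_false]
            simp [List.map_map, Function.comp_def, List.append_assoc]
          · have hc' : p ^ 3 * mm > n := by omega
            simp only [hc, if_false]
            rw [ih rest acc (by have := one_le_frameWeight vp (i, mm, pref); omega)]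
            have : frameOut vp n (i, mm, pref) = [] := by
              simp [frameOut, signatures_unfold_lt vp i mm n hi, hg, hc']
            simp [this]
      · rw [sigAltLoop]
        simp only [hi, if_false]
        rw [ih rest acc (by have := one_le_frameWeight vp (i, mm, pref); omega)]
        have : frameOut vp n (i, mm, pref) = [] := by
          simp [frameOut, signatures_unfold_ge vp i mm n hi]
        simp [this]

theorem sigAlt_eq_sig (vp : List Int) (start m n : Int) :
    signatures_alt vp start m n = signatures vp start m n := by
  unfold signatures_alt
  rw [sigAltLoop_invariant vp n _ [(start, m, [])] []
        (by simp [frameWeight])]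
  simp [frameOut]

-- ===== VERDICT (by name: the statement is the Claim_ definition above) =====
theorem signatures_spec : Claim_equal_signatures := by
  intro vp start m n _ _
  unfold Spec_signatures
  exact (sigAlt_eq_sig vp start m n).symm
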